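-- pv_equiv track=rewrite | github.com/Aryanamish/daily_practice | codechef/3_07_22/k_mex.py | solve
-- ===== SOURCE A (Python) =====
-- def solve(n, no_of_element, mex, arr):
--     elements_required = {i for i in range(mex)}
--     no_of_mex = 0
--     for i in range(n):
--         if i+1 > no_of_element:
--             break
--         if arr[i] in elements_required:
--             elements_required.remove(arr[i])
--         elif arr[i] == mex:
--             no_of_mex += 1
--
--     if len(elements_required) == 0 and no_of_element <= n-no_of_mex:
--         return "YES"
--     else:
--         return "NO"
-- ===== SOURCE B (Python) =====
-- def solve(n, no_of_element, mex, arr):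
--     p = sorted(arr[:max(0, min(n, no_of_element))])
--     need = 0
--     cnt = 0
--     for v in p:
--         if need < mex and v == need:
--             need += 1
--         if v == mex:
--             cnt += 1
--     return "YES" if need >= mex and no_of_element <= n - cnt else "NO"
-- ===== Notes on version B (the rewrite author's own statement) =====
-- stated objective: alternative
-- what changed: Replaces A's hash-set removal loop by sort-then-merge-scan: the examined prefix is sorted once and a single ordered scan advances a 'need' pointer through 0..mex-1 (like a merge against range(mex)) while tallying occurrences of mex; no set is built or mutated at all.
import Mathlib
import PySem

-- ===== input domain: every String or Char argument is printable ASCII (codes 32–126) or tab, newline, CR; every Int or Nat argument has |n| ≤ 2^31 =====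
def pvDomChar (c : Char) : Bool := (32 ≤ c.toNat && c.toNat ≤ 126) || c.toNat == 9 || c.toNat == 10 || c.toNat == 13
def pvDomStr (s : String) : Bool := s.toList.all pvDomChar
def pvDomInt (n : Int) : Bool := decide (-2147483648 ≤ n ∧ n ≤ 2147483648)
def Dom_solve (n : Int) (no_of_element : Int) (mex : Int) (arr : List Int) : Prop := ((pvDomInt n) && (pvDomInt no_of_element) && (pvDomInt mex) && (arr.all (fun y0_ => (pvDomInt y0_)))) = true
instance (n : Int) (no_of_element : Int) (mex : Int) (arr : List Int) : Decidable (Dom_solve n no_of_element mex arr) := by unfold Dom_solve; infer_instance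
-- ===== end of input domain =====

-- B replaces A's hash-set removal loop by sort-then-merge-scan: sort the examined prefix once,
-- then one ordered scan advances a 'need' pointer through 0..mex-1 while tallying mex (objective: alternative).


-- ===== PORT A =====
-- the 'for i in range(n): if i+1 > no_of_element: break ...' loop; Python's range(n) is lazy,
-- so the port recurses on the index i (0, 1, ...) and stops at i = n or at the break
def solveLoopA (n no_of_element mex : Int) (arr : List Int) (i : Int)
    (req : PySem.Set Int) (cnt : Int) : PySem.Set Int × Int :=
  if _h : i < n then
    if i + 1 > no_of_element then (req, cnt)          -- break
    else
      match PySem.List.pyGet? arr i with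
      | none => (req, cnt)                            -- IndexError; excluded by Pre_solve
      | some v =>
        if PySem.Set.contains req v then
          match PySem.Set.remove? req v with
          | some req' => solveLoopA n no_of_element mex arr (i + 1) req' cnt
          | none => (req, cnt)                        -- unreachable: guarded by contains
        else if v == mex then solveLoopA n no_of_element mex arr (i + 1) req (cnt + 1)
        else solveLoopA n no_of_element mex arr (i + 1) req cnt
  else (req, cnt)
termination_by (n - i).toNat
decreasing_by all_goals omega

def solve (n : Int) (no_of_element : Int) (mex : Int) (arr : List Int) : String :=
  -- set(range(mex)): already-distinct elements in order, so the Set IS this list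
  let elements_required : PySem.Set Int := PySem.List.pyRange 0 mex 1
  let st := solveLoopA n no_of_element mex arr 0 elements_required 0
  if PySem.Set.len st.1 = 0 ∧ no_of_element ≤ n - st.2 then "YES" else "NO"

-- ===== PORT B =====
-- one step of B's scan over the sorted prefix: advance 'need' on a merge match, count mex
def scanB (mex : Int) (st : Int × Int) (v : Int) : Int × Int :=
  ((if st.1 < mex ∧ v = st.1 then st.1 + 1 else st.1),
   (if v = mex then st.2 + 1 else st.2))

def solve_alt (n : Int) (no_of_element : Int) (mex : Int) (arr : List Int) : String :=
  let p := PySem.List.sorted (PySem.List.slice arr none (some (max 0 (min n no_of_element)))) (fun x => x) false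
  let st := p.foldl (scanB mex) (0, 0)
  if st.1 ≥ mex ∧ no_of_element ≤ n - st.2 then "YES" else "NO"

-- ===== PRECONDITION & SPEC =====
-- A indexes arr at every i < min(n, no_of_element); Pre_ excludes exactly the inputs where that raises IndexError.
def Pre_solve (n : Int) (no_of_element : Int) (mex : Int) (arr : List Int) : Prop :=
  min n no_of_element ≤ (arr.length : Int)
instance (n : Int) (no_of_element : Int) (mex : Int) (arr : List Int) : Decidable (Pre_solve n no_of_element mex arr) := by unfold Pre_solve; infer_instance
def pvWitness_solve : Int × Int × Int × List Int := (3, 2, 1, [0, 5, 7])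

def Spec_solve (n : Int) (no_of_element : Int) (mex : Int) (arr : List Int) (out : String) : Prop := out = solve_alt n no_of_element mex arr
instance (n : Int) (no_of_element : Int) (mex : Int) (arr : List Int) (out : String) : Decidable (Spec_solve n no_of_element mex arr out) := by unfold Spec_solve; infer_instance

-- ===== CLAIM (what is proved, stated in full; the proofs are below) =====
def Claim_equal_solve : Prop := ∀ (n : Int) (no_of_element : Int) (mex : Int) (arr : List Int), Dom_solve n no_of_element mex arr → Pre_solve n no_of_element mex arr → Spec_solve n no_of_element mex arr (solve n no_of_element mex arr)

-- ===== LEMMAS AND PROOFS =====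

-- the fold step that one iteration of A's loop performs on (elements_required, no_of_mex)
def stepA (mex : Int) (st : PySem.Set Int × Int) (v : Int) : PySem.Set Int × Int :=
  if PySem.Set.contains st.1 v then
    match PySem.Set.remove? st.1 v with
    | some r => (r, st.2)
    | none => st
  else if v == mex then (st.1, st.2 + 1) else st

-- A's loop over range(n) with its break equals a fold over the prefix arr[:min(n, no_of_element)]
theorem solveLoopA_eq (no_of_element mex : Int) (arr : List Int) (n : Int)
    (hpre : min n no_of_element ≤ (arr.length : Int)) :
    ∀ (m j : Nat), ((min n no_of_element).toNat - j = m) → ∀ (req : PySem.Set Int) (cnt : Int),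
      solveLoopA n no_of_element mex arr (j : Int) req cnt
        = ((arr.drop j).take ((min n no_of_element).toNat - j)).foldl (stepA mex) (req, cnt) := by
  intro m
  induction m with
  | zero =>
    intro j hj req cnt
    rw [hj, List.take_zero, List.foldl_nil, solveLoopA]
    by_cases hn : (j : Int) < n
    · have hje : no_of_element ≤ (j : Int) := by
        have := Int.toNat_le.mp (Nat.le_of_sub_eq_zero hj)
        omega
      rw [dif_pos hn, if_pos (by omega)]
    · rw [dif_neg hn]
  | succ m ih =>
    intro j hj req cnt
    have hjk : (j : Int) < min n no_of_element := by
      have : j < (min n no_of_element).toNat := by omega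
      omega
    have hjn : (j : Int) < n := by omega
    have hjA : j < arr.length := by omega
    have hdrop : arr.drop j = arr[j] :: arr.drop (j + 1) := List.drop_eq_getElem_cons hjA
    have htake : ((arr.drop j).take ((min n no_of_element).toNat - j))
        = arr[j] :: ((arr.drop (j + 1)).take ((min n no_of_element).toNat - (j + 1))) := by
      rw [hdrop]
      have : (min n no_of_element).toNat - j = ((min n no_of_element).toNat - (j + 1)) + 1 := by omega
      rw [this, List.take_succ_cons]
    rw [htake, List.foldl_cons]
    have hget : PySem.List.pyGet? arr ((j : Int)) = some arr[j] := by
      rw [PySem.List.pyGet?_natCast]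
      simp [hjA]
    have hrec : ∀ req' cnt', solveLoopA n no_of_element mex arr ((j : Int) + 1) req' cnt'
        = ((arr.drop (j + 1)).take ((min n no_of_element).toNat - (j + 1))).foldl (stepA mex) (req', cnt') := by
      intro req' cnt'
      have := ih (j + 1) (by omega) req' cnt'
      simpa [Nat.cast_add, Nat.cast_one] using this
    rw [solveLoopA, dif_pos hjn, if_neg (by omega), hget]
    by_cases hc : PySem.Set.contains req arr[j] = true
    · have hmem : arr[j] ∈ req := by simpa using hc
      cases hrem : PySem.Set.remove? req arr[j] with
      | some r => simp [stepA, hc, hrem, hrec, hmem]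
      | none => exfalso; simp [PySem.Set.remove?_of_mem hmem] at hrem
    · have hc' : arr[j] ∉ req := fun h => hc (by simpa using h)
      by_cases hm : (arr[j] == mex) = true
      · simp [stepA, hc', hm, hrec]
      · simp [stepA, hc', hm, hrec]

-- characterisation of A's fold: remaining required elements = filter, counter = count
theorem foldA_char (mex : Int) :
    ∀ (p req : List Int) (cnt : Int), req.Nodup → (∀ v ∈ req, v < mex) →
      p.foldl (stepA mex) (req, cnt)
        = (req.filter (fun v => !p.contains v), cnt + (p.count mex : Int)) := by
  intro p
  induction p with
  | nil => intro req cnt _ _; simp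
  | cons v p ih =>
    intro req cnt hnd hlt
    by_cases hv : v ∈ req
    · have hc : PySem.Set.contains req v = true := by
        simpa [PySem.Set.contains_iff] using hv
      have hrem : PySem.Set.remove? req v = some (PySem.Set.discard req v) := PySem.Set.remove?_of_mem hv
      have hdisc : PySem.Set.discard req v = req.filter (fun u => u != v) := by
        simp [PySem.Set.discard, bne]
      have hvne : v ≠ mex := by have := hlt v hv; omega
      simp only [List.foldl_cons, stepA, hc, if_true, hrem]
      rw [ih _ cnt (hdisc ▸ hnd.filter _) (fun u hu => hlt u (by rw [hdisc] at hu; exact (List.mem_filter.mp hu).1))]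
      rw [hdisc, List.filter_filter]
      simp only [Prod.mk.injEq]
      refine ⟨?_, ?_⟩
      ·
        apply List.filter_congr
        intro u hu
        rcases eq_or_ne u v with h | h
        · simp [h]
        · simp [h, Ne.symm h]
      · simp [List.count_cons, hvne, Ne.symm hvne]
    · have hc : PySem.Set.contains req v = false := by
        simp [PySem.Set.contains_iff] at *; simpa using hv
      by_cases hm : v = mex
      · subst hm
        simp only [List.foldl_cons, stepA, hc, Bool.false_eq_true, if_false, beq_self_eq_true, if_true]
        rw [ih _ (cnt + 1) hnd hlt]
        simp only [Prod.mk.injEq]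
        refine ⟨?_, ?_⟩
        · apply List.filter_congr
          intro u hu
          have : u ≠ v := by have := hlt u hu; omega
          simp [List.contains_cons, Bool.not_or, beq_iff_eq, eq_comm, Ne.symm this, this]
        · simp [List.count_cons]; omega
      · simp only [List.foldl_cons, stepA, hc, Bool.false_eq_true, if_false, beq_iff_eq, hm, if_false]
        rw [ih _ cnt hnd hlt]
        simp only [Prod.mk.injEq]
        refine ⟨?_, ?_⟩
        · apply List.filter_congr
          intro u hu
          have : u ≠ v := fun h => hv (h ▸ hu)
          simp [List.contains_cons, Bool.not_or, beq_iff_eq, eq_comm, Ne.symm this, this]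
        · simp [List.count_cons, Ne.symm hm, hm]

-- the 'need'-component of B's scan, in isolation
def needStep (mex nd v : Int) : Int := if nd < mex ∧ v = nd then nd + 1 else nd

-- B's fold splits into the need-scan and the running count of mex
theorem foldB_split (mex : Int) :
    ∀ (p : List Int) (nd c : Int),
      p.foldl (scanB mex) (nd, c) = (p.foldl (needStep mex) nd, c + (p.count mex : Int)) := by
  intro p
  induction p with
  | nil => intro nd c; simp
  | cons v p ih =>
    intro nd c
    simp only [List.foldl_cons, scanB, needStep]
    rw [ih]
    simp only [Prod.mk.injEq]
    refine ⟨by trivial, ?_⟩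
    rcases eq_or_ne v mex with hm | hm
    · subst hm; simp [List.count_cons]; push_cast; omega
    · simp [List.count_cons, hm, Ne.symm hm]

-- when need has reached mex (or started at/above it) the scan is constant
theorem needFold_const (mex : Int) :
    ∀ (p : List Int) (nd : Int), mex ≤ nd → p.foldl (needStep mex) nd = nd := by
  intro p
  induction p with
  | nil => intro nd _; rfl
  | cons v p ih =>
    intro nd h
    have : needStep mex nd v = nd := by simp [needStep]; omega
    simp only [List.foldl_cons, this, ih nd h]

-- when every element exceeds need, the scan is constant
theorem needFold_stuck (mex : Int) :
    ∀ (p : List Int) (nd : Int), (∀ x ∈ p, nd < x) → p.foldl (needStep mex) nd = nd := by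
  intro p
  induction p with
  | nil => intro nd _; rfl
  | cons v p ih =>
    intro nd h
    have hv : nd < v := h v (List.mem_cons_self ..)
    have : needStep mex nd v = nd := by simp [needStep]; omega
    simp only [List.foldl_cons, this]
    exact ih nd (fun x hx => h x (List.mem_cons_of_mem _ hx))

-- main characterisation: over a sorted list the scan reaches mex iff all of nd..mex-1 occur
theorem needFold_sorted (mex : Int) :
    ∀ (p : List Int), p.Pairwise (· ≤ ·) → ∀ (nd : Int), nd ≤ mex →
      (mex ≤ p.foldl (needStep mex) nd ↔ ∀ v : Int, nd ≤ v → v < mex → v ∈ p) := by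
  intro p
  induction p with
  | nil =>
    intro _ nd hle
    simp only [List.foldl_nil, List.not_mem_nil]
    constructor
    · intro h v h1 h2; omega
    · intro h
      by_contra hc
      exact h nd le_rfl (by omega)
  | cons v p ih =>
    intro hpw nd hle
    have hvle : ∀ x ∈ p, v ≤ x := fun x hx => (List.pairwise_cons.mp hpw).1 x hx
    have hpw' : p.Pairwise (· ≤ ·) := (List.pairwise_cons.mp hpw).2
    by_cases hmned : nd = mex
    · rw [needFold_const mex (v :: p) nd (by omega)]
      constructor
      · intro _ u h1 h2; omega
      · intro _; omega
    · have hndlt : nd < mex := by omega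
      by_cases hvnd : v = nd
      · subst hvnd
        have hstep : needStep mex v v = v + 1 := by simp [needStep]; omega
        simp only [List.foldl_cons, hstep]
        rw [ih hpw' (v + 1) (by omega)]
        constructor
        · intro h u h1 h2
          rcases eq_or_ne u v with h' | h'
          · exact h' ▸ List.mem_cons_self ..
          · exact List.mem_cons_of_mem _ (h u (by omega) h2)
        · intro h u h1 h2
          have := h u (by omega) h2
          rcases List.mem_cons.mp this with h' | h'
          · omega
          · exact h'
      · have hstep : needStep mex nd v = nd := by simp [needStep]; omega
        simp only [List.foldl_cons, hstep]
        by_cases hvlt : v < nd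
        · rw [ih hpw' nd hle]
          constructor
          · intro h u h1 h2; exact List.mem_cons_of_mem _ (h u h1 h2)
          · intro h u h1 h2
            rcases List.mem_cons.mp (h u h1 h2) with h' | h'
            · omega
            · exact h'
        · -- v > nd: need is stuck at nd and nd is missing from v :: p — both sides false
          have hvgt : nd < v := by omega
          rw [needFold_stuck mex p nd (fun x hx => lt_of_lt_of_le hvgt (hvle x hx))]
          constructor
          · intro h; omega
          · intro h
            have := h nd le_rfl hndlt
            rcases List.mem_cons.mp this with h' | h'
            · omega
            · exact absurd (hvle nd h') (by omega)

-- ===== VERDICT (by name: the statement is the Claim_ definition above) =====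
theorem solve_spec : Claim_equal_solve := by
  intro n noe mex arr _ hpre
  unfold Pre_solve at hpre
  simp only [Spec_solve, solve, solve_alt]
  have hloop := solveLoopA_eq noe mex arr n hpre ((min n noe).toNat) 0 (by omega)
    (PySem.List.pyRange 0 mex 1) 0
  simp only [Nat.cast_zero, List.drop_zero, Nat.sub_zero] at hloop
  have hchar := foldA_char mex (arr.take (min n noe).toNat) (PySem.List.pyRange 0 mex 1) 0
    (PySem.List.nodup_pyRange_one 0 mex) (fun v hv => (PySem.List.mem_pyRange_one.mp hv).2)
  have hslice : PySem.List.slice arr none (some (max 0 (min n noe))) = arr.take (min n noe).toNat := by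
    have hmx : max 0 (min n noe) = (((min n noe).toNat : Nat) : Int) := by omega
    rw [hmx, PySem.List.slice_to_natCast]
  set p := arr.take (min n noe).toNat with hp
  rw [hloop, hchar, hslice]
  have hperm : (PySem.List.sorted p (fun x => x) false).Perm p := PySem.List.sorted_perm p _ _
  have hcount : (PySem.List.sorted p (fun x => x) false).count mex = p.count mex := hperm.count_eq mex
  rw [foldB_split, hcount]
  dsimp only
  apply if_congr _ rfl rfl
  simp only [ge_iff_le, PySem.Set.len, Nat.cast_eq_zero, List.length_eq_zero_iff]
  have hpw : (PySem.List.sorted p (fun x => x) false).Pairwise (· ≤ ·) := by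
    simpa using PySem.List.sorted_pairwise p (fun x => x)
  constructor
  · rintro ⟨h1, h2⟩
    refine ⟨?_, by omega⟩
    by_cases hm : 0 ≤ mex
    · rw [needFold_sorted mex _ hpw 0 hm]
      intro v h1' h2'
      rw [hperm.mem_iff]
      have := List.filter_eq_nil_iff.mp h1 v (PySem.List.mem_pyRange_one.mpr ⟨h1', h2'⟩)
      simpa using this
    · rw [needFold_const mex _ 0 (by omega)]; omega
  · rintro ⟨h1, h2⟩
    refine ⟨?_, by omega⟩
    by_cases hm : 0 ≤ mex
    · rw [needFold_sorted mex _ hpw 0 hm] at h1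
      apply List.filter_eq_nil_iff.mpr
      intro v hv
      obtain ⟨h1', h2'⟩ := PySem.List.mem_pyRange_one.mp hv
      have := h1 v h1' h2'
      rw [hperm.mem_iff] at this
      simpa using this
    · apply List.filter_eq_nil_iff.mpr
      intro v hv
      obtain ⟨h1', h2'⟩ := PySem.List.mem_pyRange_one.mp hv
      omega
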